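-- pv_equiv track=rewrite | github.com/quyencodes/structy-py | 8-mixed_recall/sorted_intervals.py | sort_intervals
-- ===== SOURCE A (Python) =====
-- def sort_intervals(intervals):
--   map = {} # key: a, value: ()
--
--   for interval in intervals:
--     a, b = interval
--     map[a] = interval
--
--   keys_sorted = sorted(map.keys()) # [1, 3, 8, 12]
--
--   sorted_intervals = []
--   for key in keys_sorted:
--     sorted_intervals.append(map[key])
--
--   return sorted_intervals
-- ===== SOURCE B (Python) =====
-- def sort_intervals(intervals):
--   result = []
--   for interval in sorted(intervals, key=lambda iv: iv[0]):
--     a, b = interval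
--     if result and result[-1][0] == a:
--       result[-1] = interval
--     else:
--       result.append(interval)
--   return result
-- ===== Notes on version B (the rewrite author's own statement) =====
-- stated objective: idiomatic
-- what changed: Replaces the dict-then-sorted-keys-then-rebuild pipeline with a single stable sort of the intervals by first element followed by one pass that keeps the last interval of each equal-first run.
import Mathlib
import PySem

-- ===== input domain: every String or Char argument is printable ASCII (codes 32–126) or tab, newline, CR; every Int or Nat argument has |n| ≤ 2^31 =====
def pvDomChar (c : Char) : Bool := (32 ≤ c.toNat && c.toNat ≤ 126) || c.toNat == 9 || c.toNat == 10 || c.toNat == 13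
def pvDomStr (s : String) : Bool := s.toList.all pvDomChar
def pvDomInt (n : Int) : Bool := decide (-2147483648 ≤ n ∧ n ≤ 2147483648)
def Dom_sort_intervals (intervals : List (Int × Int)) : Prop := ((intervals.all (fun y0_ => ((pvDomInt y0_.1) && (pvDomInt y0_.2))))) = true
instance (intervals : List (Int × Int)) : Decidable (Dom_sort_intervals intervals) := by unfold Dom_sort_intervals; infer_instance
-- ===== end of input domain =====

-- B replaces A's dict / sorted-keys / rebuild pipeline by one stable sort of the intervals
-- followed by a single last-wins dedup pass (objective: idiomatic alternative, same cost).

-- ===== PORT A =====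
-- map = {}; for interval in intervals: a, b = interval; map[a] = interval
-- (map[key] is read only for key in map.keys(), so getD's default (0, 0) is never returned)
def sort_intervals (intervals : List (Int × Int)) : List (Int × Int) :=
  let m : PySem.Dict Int (Int × Int) :=
    intervals.foldl (fun m interval => m.insert interval.1 interval) PySem.Dict.empty
  let keys_sorted := PySem.List.sorted m.keys (fun k => k) false
  keys_sorted.foldl (fun acc key => acc ++ [m.getD key (0, 0)]) []

-- ===== PORT B =====
-- one pass over the stably sorted intervals: overwrite the last slot on an equal first, else append
def sort_intervals_alt (intervals : List (Int × Int)) : List (Int × Int) :=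
  (PySem.List.sorted intervals (fun iv => iv.1) false).foldl
    (fun result interval =>
      match result.getLast? with
      | some last => if last.1 = interval.1 then result.dropLast ++ [interval]
                     else result ++ [interval]
      | none => [interval]) []

-- ===== PRECONDITION & SPEC =====
def Spec_sort_intervals (intervals : List (Int × Int)) (out : List (Int × Int)) : Prop := out = sort_intervals_alt intervals
instance (intervals : List (Int × Int)) (out : List (Int × Int)) : Decidable (Spec_sort_intervals intervals out) := by unfold Spec_sort_intervals; infer_instance

-- ===== CLAIM (what is proved, stated in full; the proofs are below) =====
def Claim_equal_sort_intervals : Prop := ∀ (intervals : List (Int × Int)), Dom_sort_intervals intervals → Spec_sort_intervals intervals (sort_intervals intervals)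

-- ===== LEMMAS AND PROOFS =====

-- B's loop body as a named function (for the proofs only; the port keeps it inline)
def pvStep (result : List (Int × Int)) (interval : Int × Int) : List (Int × Int) :=
  match result.getLast? with
  | some last => if last.1 = interval.1 then result.dropLast ++ [interval]
                 else result ++ [interval]
  | none => [interval]

def pvInsRep : List (Int × Int) → (Int × Int) → List (Int × Int)
  | [], iv => [iv]
  | x :: rest, iv =>
    if iv.1 < x.1 then iv :: x :: rest
    else if x.1 = iv.1 then iv :: rest
    else x :: pvInsRep rest iv

def pvLtFst (p q : Int × Int) : Prop := p.1 < q.1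

theorem pvMem_insRep (res : List (Int × Int)) (iv x : Int × Int)
    (h : res.Pairwise pvLtFst) :
    x ∈ pvInsRep res iv ↔ x = iv ∨ (x ∈ res ∧ x.1 ≠ iv.1) := by
  induction res with
  | nil => simp [pvInsRep]
  | cons y t ih =>
    rcases List.pairwise_cons.mp h with ⟨hy, ht⟩
    have hyt : ∀ z ∈ t, y.1 < z.1 := fun z hz => (hy z hz : y.1 < z.1)
    by_cases h1 : iv.1 < y.1
    · simp only [pvInsRep, if_pos h1, List.mem_cons]
      constructor
      · rintro (rfl | rfl | hx)
        · exact Or.inl rfl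
        · exact Or.inr ⟨Or.inl rfl, by omega⟩
        · exact Or.inr ⟨Or.inr hx, by have := hyt x hx; omega⟩
      · rintro (rfl | ⟨hx, _⟩)
        · exact Or.inl rfl
        · exact Or.inr hx
    · by_cases h2 : y.1 = iv.1
      · simp only [pvInsRep, if_neg h1, if_pos h2, List.mem_cons]
        constructor
        · rintro (rfl | hx)
          · exact Or.inl rfl
          · exact Or.inr ⟨Or.inr hx, by have := hyt x hx; omega⟩
        · rintro (rfl | ⟨(rfl | hx), hne⟩)
          · exact Or.inl rfl
          · omega
          · exact Or.inr hx
      · simp only [pvInsRep, if_neg h1, if_neg h2, List.mem_cons, ih ht]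
        constructor
        · rintro (rfl | rfl | ⟨hx, hne⟩)
          · exact Or.inr ⟨Or.inl rfl, by omega⟩
          · exact Or.inl rfl
          · exact Or.inr ⟨Or.inr hx, hne⟩
        · rintro (rfl | ⟨(rfl | hx), hne⟩)
          · exact Or.inr (Or.inl rfl)
          · exact Or.inl rfl
          · exact Or.inr (Or.inr ⟨hx, hne⟩)

theorem pvPairwise_insRep (res : List (Int × Int)) (iv : Int × Int)
    (h : res.Pairwise pvLtFst) : (pvInsRep res iv).Pairwise pvLtFst := by
  induction res with
  | nil => simp [pvInsRep, pvLtFst]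
  | cons y t ih =>
    rcases List.pairwise_cons.mp h with ⟨hy, ht⟩
    have hyt : ∀ z ∈ t, y.1 < z.1 := fun z hz => (hy z hz : y.1 < z.1)
    by_cases h1 : iv.1 < y.1
    · simp only [pvInsRep, if_pos h1]
      refine List.pairwise_cons.mpr ⟨?_, h⟩
      intro z hz
      rcases List.mem_cons.mp hz with rfl | hz
      · exact h1
      · show iv.1 < z.1; have := hyt z hz; omega
    · by_cases h2 : y.1 = iv.1
      · simp only [pvInsRep, if_neg h1, if_pos h2]
        refine List.pairwise_cons.mpr ⟨?_, ht⟩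
        intro z hz; show iv.1 < z.1; have := hyt z hz; omega
      · simp only [pvInsRep, if_neg h1, if_neg h2]
        refine List.pairwise_cons.mpr ⟨?_, ih ht⟩
        intro z hz
        rcases (pvMem_insRep t iv z ht).mp hz with rfl | ⟨hz, _⟩
        · show y.1 < z.1; omega
        · exact hy z hz

theorem pvInsRep_eq_step (res : List (Int × Int)) (iv : Int × Int)
    (h : res.Pairwise pvLtFst) (hle : ∀ p ∈ res, p.1 ≤ iv.1) :
    pvInsRep res iv = pvStep res iv := by
  induction res with
  | nil => simp [pvInsRep, pvStep]
  | cons y t ih =>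
    rcases List.pairwise_cons.mp h with ⟨hy, ht⟩
    have hyt : ∀ z ∈ t, y.1 < z.1 := fun z hz => (hy z hz : y.1 < z.1)
    have hy1 : y.1 ≤ iv.1 := hle y (List.mem_cons_self ..)
    have h1 : ¬ iv.1 < y.1 := by omega
    cases t with
    | nil =>
      by_cases h2 : y.1 = iv.1
      · simp [pvInsRep, pvStep, h2]
      · simp [pvInsRep, pvStep, h1, h2]
    | cons z t' =>
      have h2 : y.1 ≠ iv.1 := by
        have := hyt z (List.mem_cons_self ..)
        have := hle z (List.mem_cons_of_mem _ (List.mem_cons_self ..))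
        omega
      have hrec := ih ht (fun p hp => hle p (List.mem_cons_of_mem _ hp))
      have hstep : pvInsRep (y :: z :: t') iv = y :: pvInsRep (z :: t') iv := by
        rw [pvInsRep, if_neg h1, if_neg h2]
      rw [hstep, hrec]
      unfold pvStep
      simp only [List.getLast?_cons_cons]
      cases hL : (z :: t').getLast? with
      | none => simp at hL
      | some last =>
        by_cases h3 : last.1 = iv.1
        · simp only [if_pos h3]
          show y :: ((z :: t').dropLast ++ [iv]) = (y :: z :: t').dropLast ++ [iv]
          simp [List.dropLast]
        · simp [h3]

def pvCanon (xs : List (Int × Int)) : List (Int × Int) := xs.foldl pvInsRep []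

theorem pvPairwise_foldl_insRep (l : List (Int × Int)) (acc : List (Int × Int))
    (h : acc.Pairwise pvLtFst) : (l.foldl pvInsRep acc).Pairwise pvLtFst := by
  induction l generalizing acc with
  | nil => exact h
  | cons x t ih => exact ih _ (pvPairwise_insRep acc x h)

theorem pvMem_canon (xs : List (Int × Int)) (x : Int × Int) :
    x ∈ pvCanon xs ↔ (xs.filter (fun y => y.1 == x.1)).getLast? = some x := by
  induction xs using List.reverseRecOn with
  | nil => simp [pvCanon]
  | append_singleton xs iv ih =>
    have hpw : (pvCanon xs).Pairwise pvLtFst := pvPairwise_foldl_insRep xs [] (by simp)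
    have hstep : pvCanon (xs ++ [iv]) = pvInsRep (pvCanon xs) iv := by
      simp [pvCanon, List.foldl_append]
    rw [hstep, pvMem_insRep _ _ _ hpw, List.filter_append]
    by_cases hk : iv.1 = x.1
    · simp only [List.filter_cons, List.filter_nil, beq_iff_eq, hk, if_pos]
      rw [List.getLast?_concat]
      constructor
      · rintro (rfl | ⟨_, hne⟩)
        · rfl
        · omega
      · intro h; left; exact (Option.some_inj.mp h).symm
    · have hb : (iv.1 == x.1) = false := by simp [hk]
      have : (List.filter (fun y => y.1 == x.1) [iv]) = [] := by
        simp [List.filter, hb]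
      rw [this, List.append_nil, ← ih]
      constructor
      · rintro (rfl | ⟨hx, _⟩)
        · omega
        · exact hx
      · intro h
        right
        refine ⟨h, ?_⟩
        omega

def pvDict (xs : List (Int × Int)) : PySem.Dict Int (Int × Int) :=
  xs.foldl (fun m interval => m.insert interval.1 interval) PySem.Dict.empty

theorem pvGet?_dict (xs : List (Int × Int)) (k : Int) :
    (pvDict xs).get? k = (xs.filter (fun y => y.1 == k)).getLast? := by
  induction xs using List.reverseRecOn with
  | nil => simp [pvDict, PySem.Dict.get?_empty]
  | append_singleton xs iv ih =>
    have hstep : pvDict (xs ++ [iv]) = (pvDict xs).insert iv.1 iv := by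
      simp [pvDict, List.foldl_append]
    rw [hstep, PySem.Dict.get?_insert, List.filter_append]
    by_cases hk : k = iv.1
    · have : (List.filter (fun y => y.1 == k) [iv]) = [iv] := by simp [List.filter, hk]
      rw [this, List.getLast?_concat, if_pos hk]
    · have hb : (iv.1 == k) = false := by simp; omega
      have : (List.filter (fun y => y.1 == k) [iv]) = [] := by
        simp [List.filter, hb]
      rw [this, List.append_nil, if_neg hk, ih]

theorem pvNodup_keys_dict (xs : List (Int × Int)) : (pvDict xs).keys.Nodup :=
  PySem.Dict.nodup_keys_foldl_insert_key xs (fun iv => iv.1) (fun _ iv => iv)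
    PySem.Dict.empty PySem.Dict.nodup_keys_empty

theorem pvFoldl_step_eq_insRep (l acc : List (Int × Int))
    (hacc : acc.Pairwise pvLtFst)
    (hle : ∀ p ∈ acc, ∀ q ∈ l, p.1 ≤ q.1)
    (hl : l.Pairwise (fun p q : Int × Int => p.1 ≤ q.1)) :
    l.foldl pvStep acc = l.foldl pvInsRep acc := by
  induction l generalizing acc with
  | nil => rfl
  | cons x t ih =>
    rcases List.pairwise_cons.mp hl with ⟨hx, ht⟩
    have h1 : pvStep acc x = pvInsRep acc x :=
      (pvInsRep_eq_step acc x hacc (fun p hp => hle p hp x (List.mem_cons_self ..))).symm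
    have hacc' : (pvInsRep acc x).Pairwise pvLtFst := pvPairwise_insRep acc x hacc
    have hle' : ∀ p ∈ pvInsRep acc x, ∀ q ∈ t, p.1 ≤ q.1 := by
      intro p hp q hq
      rcases (pvMem_insRep acc x p hacc).mp hp with rfl | ⟨hp, _⟩
      · exact hx q hq
      · exact hle p hp q (List.mem_cons_of_mem _ hq)
    simp only [List.foldl_cons, h1]
    exact ih (pvInsRep acc x) hacc' hle' ht

theorem pvFilter_insertBy (ys : List (Int × Int)) (x : Int × Int) (k : Int)
    (h : ys.Pairwise (fun p q : Int × Int => p.1 ≤ q.1)) :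
    (PySem.List.insertBy (fun a b : Int × Int => decide (a.1 < b.1)) x ys).filter
        (fun y => y.1 == k) =
      if x.1 = k then ys.filter (fun y => y.1 == k) ++ [x]
      else ys.filter (fun y => y.1 == k) := by
  induction ys with
  | nil =>
    by_cases hk : x.1 = k <;> simp [PySem.List.insertBy, List.filter, hk]
  | cons y t ih =>
    rcases List.pairwise_cons.mp h with ⟨hy, ht⟩
    rw [PySem.List.insertBy]
    by_cases hb : x.1 < y.1
    · rw [if_pos (by simpa using hb)]
      by_cases hk : x.1 = k
      · have hnil : (y :: t).filter (fun y => y.1 == k) = [] := by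
          rw [List.filter_eq_nil_iff]
          intro a ha
          have : y.1 ≤ a.1 := by
            rcases List.mem_cons.mp ha with rfl | ha
            · omega
            · exact hy a ha
          simp; omega
        simp only [if_pos hk, hnil]
        have hxk : (x.1 == k) = true := by simp [hk]
        simp [hxk, hnil]
      · have hxk : (x.1 == k) = false := by simp [hk]
        simp [List.filter_cons, hxk, hk]
    · rw [if_neg (by simpa using hb)]
      simp only [List.filter_cons, ih ht]
      by_cases hk : x.1 = k <;> by_cases hyk : (y.1 == k) <;>
        simp_all

theorem pvFilter_sorted (xs : List (Int × Int)) (k : Int) :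
    (PySem.List.sorted xs (fun iv => iv.1) false).filter (fun y => y.1 == k) =
      xs.filter (fun y => y.1 == k) := by
  induction xs using List.reverseRecOn with
  | nil => simp [PySem.List.sorted]
  | append_singleton xs x ih =>
    have hs : PySem.List.sorted (xs ++ [x]) (fun iv : Int × Int => iv.1) false =
        PySem.List.insertBy (fun a b : Int × Int => decide (a.1 < b.1)) x
          (PySem.List.sorted xs (fun iv => iv.1) false) := by
      rw [PySem.List.sorted_eq_foldl_insertBy, PySem.List.sorted_eq_foldl_insertBy,
        List.foldl_append, List.foldl_cons, List.foldl_nil]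
    rw [hs, pvFilter_insertBy _ _ _ (PySem.List.sorted_pairwise xs (fun iv => iv.1)),
      List.filter_append]
    by_cases hk : x.1 = k
    · have hxk : (x.1 == k) = true := by simp [hk]
      simp [hk, ih]
    · have hxk : (x.1 == k) = false := by simp [hk]
      simp [ih, hxk, hk]


theorem pvA_eq_map (xs : List (Int × Int)) :
    sort_intervals xs =
      (PySem.List.sorted (pvDict xs).keys (fun k => k) false).map
        (fun k => (pvDict xs).getD k (0, 0)) := by
  show (PySem.List.sorted (pvDict xs).keys (fun k => k) false).foldl
      (fun acc key => acc ++ [(pvDict xs).getD key (0, 0)]) [] = _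
  rw [PySem.List.foldl_append_singleton_eq_map]
  simp

theorem pvB_eq_foldl (xs : List (Int × Int)) :
    sort_intervals_alt xs =
      (PySem.List.sorted xs (fun iv => iv.1) false).foldl pvStep [] := rfl

theorem pvGetD_spec (xs : List (Int × Int)) (k : Int) (hk : k ∈ (pvDict xs).keys) :
    ∃ v, (pvDict xs).get? k = some v ∧ v.1 = k ∧ (pvDict xs).getD k (0, 0) = v := by
  have hne : (pvDict xs).get? k ≠ none := by
    intro h
    exact (PySem.Dict.get?_eq_none_iff_not_mem_keys _ _).mp h hk
  cases hv : (pvDict xs).get? k with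
  | none => exact absurd hv hne
  | some v =>
    refine ⟨v, rfl, ?_, ?_⟩
    · have hmem : v ∈ xs.filter (fun y => y.1 == k) := by
        rw [pvGet?_dict] at hv
        exact List.mem_of_getLast? hv
      have := List.of_mem_filter hmem
      simpa using this
    · rw [PySem.Dict.getD_eq_get?_getD, hv]; rfl

theorem pvMem_A (xs : List (Int × Int)) (x : Int × Int) :
    x ∈ sort_intervals xs ↔ (xs.filter (fun y => y.1 == x.1)).getLast? = some x := by
  rw [pvA_eq_map, List.mem_map]
  constructor
  · rintro ⟨k, hk, rfl⟩
    have hk' : k ∈ (pvDict xs).keys := (PySem.List.mem_sorted _ _ _ _).mp hk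
    obtain ⟨v, hv, hfst, hgd⟩ := pvGetD_spec xs k hk'
    rw [hgd, ← pvGet?_dict, hfst]
    exact hv
  · intro h
    have hget : (pvDict xs).get? x.1 = some x := by rw [pvGet?_dict]; exact h
    have hk : x.1 ∈ (pvDict xs).keys := by
      by_contra hc
      rw [← PySem.Dict.get?_eq_none_iff_not_mem_keys] at hc
      rw [hget] at hc; cases hc
    refine ⟨x.1, (PySem.List.mem_sorted _ _ _ _).mpr hk, ?_⟩
    rw [PySem.Dict.getD_eq_get?_getD, hget]
    rfl

theorem pvPairwise_A (xs : List (Int × Int)) : (sort_intervals xs).Pairwise pvLtFst := by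
  rw [pvA_eq_map, List.pairwise_map]
  have hle : (PySem.List.sorted (pvDict xs).keys (fun k => k) false).Pairwise
      (fun a b : Int => a ≤ b) := PySem.List.sorted_pairwise _ _
  have hnd : (PySem.List.sorted (pvDict xs).keys (fun k => k) false).Nodup :=
    ((PySem.List.sorted_perm (pvDict xs).keys (fun k => k) false).symm).nodup
      (pvNodup_keys_dict xs)
  refine (hle.and hnd).imp_of_mem ?_
  intro a b ha hb hab
  have ha' : a ∈ (pvDict xs).keys := (PySem.List.mem_sorted _ _ _ _).mp ha
  have hb' : b ∈ (pvDict xs).keys := (PySem.List.mem_sorted _ _ _ _).mp hb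
  obtain ⟨v, _, hva, hga⟩ := pvGetD_spec xs a ha'
  obtain ⟨w, _, hwb, hgb⟩ := pvGetD_spec xs b hb'
  show ((pvDict xs).getD a (0, 0)).1 < ((pvDict xs).getD b (0, 0)).1
  rw [hga, hgb, hva, hwb]
  rcases hab with ⟨h1, h2⟩
  omega

theorem pvMain (xs : List (Int × Int)) : sort_intervals xs = sort_intervals_alt xs := by
  have hBs : sort_intervals_alt xs =
      pvCanon (PySem.List.sorted xs (fun iv => iv.1) false) := by
    rw [pvB_eq_foldl]
    exact pvFoldl_step_eq_insRep _ [] (by simp) (by simp)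
      (PySem.List.sorted_pairwise xs _)
  have hBpw : (sort_intervals_alt xs).Pairwise pvLtFst := by
    rw [hBs]; exact pvPairwise_foldl_insRep _ [] (by simp)
  have hBmem : ∀ x, x ∈ sort_intervals_alt xs ↔
      (xs.filter (fun y => y.1 == x.1)).getLast? = some x := by
    intro x
    rw [hBs, pvMem_canon, pvFilter_sorted]
  have hApw := pvPairwise_A xs
  have hAnd : (sort_intervals xs).Nodup :=
    hApw.imp (fun h he => (ne_of_lt (h : _ < _)) (congrArg Prod.fst he))
  have hBnd : (sort_intervals_alt xs).Nodup :=
    hBpw.imp (fun h he => (ne_of_lt (h : _ < _)) (congrArg Prod.fst he))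
  have hperm : (sort_intervals xs).Perm (sort_intervals_alt xs) :=
    (List.perm_ext_iff_of_nodup hAnd hBnd).mpr
      (fun a => by rw [pvMem_A, hBmem])
  exact List.Perm.eq_of_pairwise
    (fun a b _ _ h1 h2 =>
      absurd (h1 : a.1 < b.1) (not_lt.mpr (le_of_lt (h2 : b.1 < a.1))))
    hApw hBpw hperm

-- ===== VERDICT (by name: the statement is the Claim_ definition above) =====
theorem sort_intervals_spec : Claim_equal_sort_intervals := by
  intro intervals _
  unfold Spec_sort_intervals
  exact pvMain intervals
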